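-- pv_equiv track=rewrite | github.com/ClaudiuNedelcu1307/BigDataPrj | Node.py | taranie
-- ===== SOURCE A (Python) =====
-- def taranie(cols): # ASTA E MARE TARANIE .. SCHIMBA !!! FA CEVA INTELIGENT
--     # IN LISTA COLS AM : ['sum', '(', 'a', ')', ',', 'b']
--     # AM NEVOIE : ['sum(a)', 'b']
--     aux = ''
--     SPECIALS2 = ['sum', 'count', 'min', 'max', 'count', 'avg', '(']
--     newCols = []
--     for word in cols:
--         if word == ',':
--             continue
--         if word == ')':
--             aux += word
--             newCols.append(aux)
--             aux = ''
--         elif word in SPECIALS2: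
--             aux += word
--         elif len(aux) > 0:
--             aux += word
--         else:
--             aux += word
--             newCols.append(aux)
--             aux = ''
--     return newCols
-- ===== SOURCE B (Python) =====
-- def taranie(cols):
--     SPECIALS2 = ('sum', 'count', 'min', 'max', 'avg', '(')
--     out = []
--     i, n = 0, len(cols)
--     while i < n:
--         w = cols[i]
--         if w == ',':
--             i += 1
--         elif w == ')':
--             out.append(')')
--             i += 1
--         elif w in SPECIALS2:
--             grp = w
--             i += 1
--             while i < n and cols[i] != ')':
--                 if cols[i] != ',':
--                     grp += cols[i]
--                 i += 1
--             if i < n:  # closing ')' found; an unclosed group is dropped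
--                 out.append(grp + ')')
--                 i += 1
--         else:
--             out.append(w)
--             i += 1
--     return out
-- ===== Notes on version B (the rewrite author's own statement) =====
-- stated objective: alternative
-- what changed: Replaced the flag-accumulator fold (aux string carried across iterations) by an index-based scanner that consumes a whole aggregate group with an inner look-ahead loop when a special token starts one.
import Mathlib
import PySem

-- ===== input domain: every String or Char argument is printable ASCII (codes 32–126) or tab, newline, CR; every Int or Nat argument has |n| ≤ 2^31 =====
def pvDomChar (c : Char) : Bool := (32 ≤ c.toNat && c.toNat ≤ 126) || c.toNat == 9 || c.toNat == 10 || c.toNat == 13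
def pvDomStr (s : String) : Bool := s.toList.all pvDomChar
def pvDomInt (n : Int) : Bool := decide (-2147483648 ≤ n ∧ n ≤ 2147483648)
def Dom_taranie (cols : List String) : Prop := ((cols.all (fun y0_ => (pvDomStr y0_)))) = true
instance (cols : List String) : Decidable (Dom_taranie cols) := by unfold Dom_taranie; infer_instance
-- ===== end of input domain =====

-- B is an alternative decomposition of the same O(n) merge: an index scanner with an
-- inner look-ahead loop per aggregate group, instead of A's aux-flag accumulator fold.

-- ===== PORT A =====
-- A's SPECIALS2 literal (with its duplicated 'count')
def taranieSpecials : List String := ["sum", "count", "min", "max", "count", "avg", "("]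

-- the body of A's for-loop, state = (aux, newCols)
def taranieStep (st : String × List String) (word : String) : String × List String :=
  if word = "," then st
  else if word = ")" then ("", st.2 ++ [st.1 ++ word])
  else if word ∈ taranieSpecials then (st.1 ++ word, st.2)
  else if PySem.Str.len st.1 > 0 then (st.1 ++ word, st.2)
  else ("", st.2 ++ [st.1 ++ word])

def taranie (cols : List String) : List String :=
  (cols.foldl taranieStep ("", [])).2

-- ===== PORT B =====
def taranieAltSpecials : List String := ["sum", "count", "min", "max", "avg", "("]

-- inner while loop: consume tokens into grp until ')'; none = the ')' was never found
def taranieAltGroup (grp : String) : List String → Option (String × List String)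
  | [] => none
  | w :: rest =>
    if w = ")" then some (grp ++ ")", rest)
    else if w = "," then taranieAltGroup grp rest
    else taranieAltGroup (grp ++ w) rest

theorem taranieAltGroup_len {grp : String} {l : List String} {g : String} {rest : List String}
    (h : taranieAltGroup grp l = some (g, rest)) : rest.length < l.length := by
  induction l generalizing grp with
  | nil => simp [taranieAltGroup] at h
  | cons w t ih =>
    simp only [taranieAltGroup] at h
    split_ifs at h with h1 h2
    · cases h; simp
    · exact Nat.lt_trans (ih h) (by simp)
    · exact Nat.lt_trans (ih h) (by simp)

-- outer while loop (index scan ≡ structural recursion on the remaining suffix)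
def taranieAltGo : List String → List String
  | [] => []
  | w :: rest =>
    if w = "," then taranieAltGo rest
    else if w = ")" then ")" :: taranieAltGo rest
    else if w ∈ taranieAltSpecials then
      match h : taranieAltGroup w rest with
      | some (g, rest') => g :: taranieAltGo rest'
      | none => []
    else w :: taranieAltGo rest
termination_by l => l.length
decreasing_by
  · simp
  · simp
  · exact Nat.lt_trans (taranieAltGroup_len h) (by simp)
  · simp

def taranie_alt (cols : List String) : List String := taranieAltGo cols

-- ===== PRECONDITION & SPEC =====
def Spec_taranie (cols : List String) (out : List String) : Prop := out = taranie_alt cols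
instance (cols : List String) (out : List String) : Decidable (Spec_taranie cols out) := by unfold Spec_taranie; infer_instance

-- ===== CLAIM (what is proved, stated in full; the proofs are below) =====
def Claim_equal_taranie : Prop := ∀ (cols : List String), Dom_taranie cols → Spec_taranie cols (taranie cols)


-- ===== LEMMAS AND PROOFS =====

theorem str_append_ne_empty {a b : String} (h : a ≠ "") : a ++ b ≠ "" := by
  intro hc
  apply h
  have := congrArg String.toList hc
  simp at this
  exact this.1

theorem str_len_pos {a : String} (h : a ≠ "") : PySem.Str.len a > 0 := by
  simp [PySem.Str.len_eq, Nat.pos_iff_ne_zero, String.length_eq_zero_iff, h]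

-- mid-group invariant, closing ')' found: A's fold emits exactly the group B builds
theorem taranie_group_some (l : List String) : ∀ (aux : String) (acc : List String)
    (g : String) (rest : List String), aux ≠ "" → taranieAltGroup aux l = some (g, rest) →
    List.foldl taranieStep (aux, acc) l = List.foldl taranieStep ("", acc ++ [g]) rest := by
  induction l with
  | nil => intro aux acc g rest h hg; simp [taranieAltGroup] at hg
  | cons w t ih =>
    intro aux acc g rest h hg
    by_cases hr : w = ")"
    · subst hr
      simp [taranieAltGroup] at hg
      obtain ⟨hg1, hg2⟩ := hg
      subst hg1; subst hg2
      simp [taranieStep]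
    · by_cases hc : w = ","
      · subst hc
        simp [taranieAltGroup] at hg
        rw [List.foldl_cons, show taranieStep (aux, acc) "," = (aux, acc) from by simp [taranieStep]]
        exact ih aux acc g rest h hg
      · have hgrp : taranieAltGroup (aux ++ w) t = some (g, rest) := by
          simpa [taranieAltGroup, hr, hc] using hg
        have hstep : taranieStep (aux, acc) w = (aux ++ w, acc) := by
          simp only [taranieStep, hc, hr, if_false]
          split_ifs
          · rfl
          · rfl
          · exact absurd (str_len_pos h) (by assumption)
        rw [List.foldl_cons, hstep]
        exact ih (aux ++ w) acc g rest (str_append_ne_empty h) hgrp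

-- mid-group invariant, no closing ')': A's aux is dropped, nothing more is emitted
theorem taranie_group_none (l : List String) : ∀ (aux : String) (acc : List String),
    aux ≠ "" → taranieAltGroup aux l = none →
    (List.foldl taranieStep (aux, acc) l).2 = acc := by
  induction l with
  | nil => intro aux acc h hg; simp
  | cons w t ih =>
    intro aux acc h hg
    by_cases hr : w = ")"
    · subst hr; simp [taranieAltGroup] at hg
    · by_cases hc : w = ","
      · subst hc
        simp [taranieAltGroup] at hg
        rw [List.foldl_cons, show taranieStep (aux, acc) "," = (aux, acc) from by simp [taranieStep]]
        exact ih aux acc h hg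
      · have hgrp : taranieAltGroup (aux ++ w) t = none := by
          simpa [taranieAltGroup, hr, hc] using hg
        have hstep : taranieStep (aux, acc) w = (aux ++ w, acc) := by
          simp only [taranieStep, hc, hr, if_false]
          split_ifs
          · rfl
          · rfl
          · exact absurd (str_len_pos h) (by assumption)
        rw [List.foldl_cons, hstep]
        exact ih (aux ++ w) acc (str_append_ne_empty h) hgrp

theorem taranie_specials_iff (w : String) : w ∈ taranieSpecials ↔ w ∈ taranieAltSpecials := by
  simp [taranieSpecials, taranieAltSpecials]; tauto

-- main invariant: A's fold from an empty aux equals acc ++ B's scan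
theorem taranie_main (l : List String) (acc : List String) :
    (List.foldl taranieStep ("", acc) l).2 = acc ++ taranieAltGo l := by
  induction hn : l.length using Nat.strong_induction_on generalizing l acc with
  | _ n ih =>
  cases l with
  | nil => simp [taranieAltGo]
  | cons w t =>
    subst hn
    by_cases hc : w = ","
    · subst hc
      rw [List.foldl_cons, show taranieStep ("", acc) "," = ("", acc) from by simp [taranieStep],
        show taranieAltGo ("," :: t) = taranieAltGo t from by simp [taranieAltGo]]
      exact ih t.length (by simp) t acc rfl
    · by_cases hr : w = ")"
      · subst hr
        rw [List.foldl_cons,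
          show taranieStep ("", acc) ")" = ("", acc ++ [")"]) from by simp [taranieStep],
          show taranieAltGo (")" :: t) = ")" :: taranieAltGo t from by simp [taranieAltGo]]
        rw [ih t.length (by simp) t (acc ++ [")"]) rfl]
        simp
      · by_cases hs : w ∈ taranieAltSpecials
        · have hs' : w ∈ taranieSpecials := (taranie_specials_iff w).2 hs
          have hne : w ≠ "" := by
            have h6 := hs
            simp only [taranieAltSpecials, List.mem_cons, List.not_mem_nil, or_false] at h6
            rcases h6 with rfl | rfl | rfl | rfl | rfl | rfl <;> decide
          have hstep : taranieStep ("", acc) w = (w, acc) := by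
            simp [taranieStep, hc, hr, hs']
          rw [List.foldl_cons, hstep]
          simp only [taranieAltGo, if_neg hc, if_neg hr, if_pos hs]
          split
          · next g rest' heq =>
            rw [taranie_group_some t w acc g rest' hne heq,
              ih rest'.length (Nat.lt_trans (taranieAltGroup_len heq) (by simp)) rest'
                (acc ++ [g]) rfl]
            simp
          · next heq =>
            rw [taranie_group_none t w acc hne heq]
            simp
        · have hs' : w ∉ taranieSpecials := fun h => hs ((taranie_specials_iff w).1 h)
          have hstep : taranieStep ("", acc) w = ("", acc ++ [w]) := by
            simp [taranieStep, hc, hr, hs', PySem.Str.len_eq]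
          rw [List.foldl_cons, hstep,
            show taranieAltGo (w :: t) = w :: taranieAltGo t from by
              simp [taranieAltGo, hc, hr, hs]]
          rw [ih t.length (by simp) t (acc ++ [w]) rfl]
          simp

-- ===== VERDICT (by name: the statement is the Claim_ definition above) =====
theorem taranie_spec : Claim_equal_taranie := by
  intro cols _
  unfold Spec_taranie taranie taranie_alt
  simpa using taranie_main cols []
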